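-- pv_equiv track=rewrite | github.com/PatrickSinger99/ReinforcementLearningInventoryManagement | 7_demand_forecasting/rl_environment.py | create_actions_conversion_dict
-- ===== SOURCE A (Python) =====
-- import itertools
--
-- def create_actions_conversion_dict(action_space):
--     actions_as_lists = []
--
--     for entry in action_space:
--         new_list = []
--         for pos in range(entry):
--             new_list.append(pos)
--         actions_as_lists.append(new_list)
--
--     actions_dict = {}
--     all_pos_action_comb = list(itertools.product(*actions_as_lists))
--
--     count = 0
--     for action_combination in all_pos_action_comb:
--         actions_dict[count] = list(action_combination)
--         count += 1
--
--     return actions_dict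
-- ===== SOURCE B (Python) =====
-- def create_actions_conversion_dict(action_space):
--     radix = list(action_space)
--     if any(e <= 0 for e in radix):
--         return {}
--     total = 1
--     for e in radix:
--         total *= e
--     actions_dict = {}
--     for idx in range(total):
--         combo = []
--         r = idx
--         for e in reversed(radix):
--             combo.append(r % e)
--             r //= e
--         combo.reverse()
--         actions_dict[idx] = combo
--     return actions_dict
-- ===== Notes on version B (the rewrite author's own statement) =====
-- stated objective: alternative
-- what changed: Replaces materializing all per-dimension range lists and the full itertools.product list with a direct mixed-radix decode: each index 0..total-1 is converted to its combination by repeated divmod over the reversed radixes, with an early empty-dict return when any dimension is nonpositive.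
import Mathlib
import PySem

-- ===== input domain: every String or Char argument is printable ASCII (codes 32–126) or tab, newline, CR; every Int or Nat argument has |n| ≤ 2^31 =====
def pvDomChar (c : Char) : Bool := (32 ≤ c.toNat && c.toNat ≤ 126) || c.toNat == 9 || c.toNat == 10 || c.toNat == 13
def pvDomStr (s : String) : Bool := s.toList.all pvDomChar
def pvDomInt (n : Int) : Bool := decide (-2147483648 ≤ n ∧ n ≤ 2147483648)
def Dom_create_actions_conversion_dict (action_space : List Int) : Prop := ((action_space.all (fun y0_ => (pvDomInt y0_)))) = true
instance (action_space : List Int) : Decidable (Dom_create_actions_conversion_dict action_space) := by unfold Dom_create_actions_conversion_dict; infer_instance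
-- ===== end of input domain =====

-- B replaces itertools.product over materialized range lists by a direct mixed-radix decode of each index (alternative algorithm, no intermediate product list).

-- ===== PORT A =====
-- hand port of itertools.product(*lists): first list outermost, last varies fastest; exact on lists of lists
def pyProduct : List (List Int) → List (List Int)
  | [] => [[]]
  | l :: ls => l.flatMap (fun x => (pyProduct ls).map (fun c => x :: c))

def create_actions_conversion_dict (action_space : List Int) : List (Int × List Int) :=
  let actions_as_lists := action_space.foldl
    (fun acc entry => acc ++ [(PySem.List.pyRange 0 entry 1).foldl (fun nl pos => nl ++ [pos]) []]) []
  let all_pos_action_comb := pyProduct actions_as_lists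
  let st := all_pos_action_comb.foldl
    (fun (st : PySem.Dict Int (List Int) × Int) comb => (st.1.insert st.2 comb, st.2 + 1))
    (PySem.Dict.empty, 0)
  st.1.items

-- ===== PORT B =====
def create_actions_conversion_dict_alt (action_space : List Int) : List (Int × List Int) :=
  let radix := action_space
  if radix.any (fun e => decide (e ≤ 0)) then (PySem.Dict.empty : PySem.Dict Int (List Int)).items
  else
    let total := radix.foldl (fun t e => t * e) 1
    ((PySem.List.pyRange 0 total 1).foldl
      (fun (d : PySem.Dict Int (List Int)) idx =>
        d.insert idx
          (radix.reverse.foldl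
            (fun (st : List Int × Int) e => (st.1 ++ [PySem.Int.mod st.2 e], PySem.Int.floordiv st.2 e))
            ([], idx)).1.reverse)
      PySem.Dict.empty).items

-- ===== PRECONDITION & SPEC =====
def Spec_create_actions_conversion_dict (action_space : List Int) (out : List (Int × List Int)) : Prop := out = create_actions_conversion_dict_alt action_space
instance (action_space : List Int) (out : List (Int × List Int)) : Decidable (Spec_create_actions_conversion_dict action_space out) := by unfold Spec_create_actions_conversion_dict; infer_instance

-- ===== CLAIM (what is proved, stated in full; the proofs are below) =====
def Claim_equal_create_actions_conversion_dict : Prop := ∀ (action_space : List Int), Dom_create_actions_conversion_dict action_space → Spec_create_actions_conversion_dict action_space (create_actions_conversion_dict action_space)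

-- ===== LEMMAS AND PROOFS =====

-- mixed-radix decode specification (most significant digit first)
def decMix : Int → List Int → List Int
  | _, [] => []
  | idx, e :: rest => (idx / rest.prod) % e :: decMix (idx % rest.prod) rest

lemma prod_pos_of_mem {es : List Int} (h : ∀ e ∈ es, 0 < e) : 0 < es.prod := by
  induction es with
  | nil => simp
  | cons e rest ih =>
    simp only [List.prod_cons]
    exact mul_pos (h e (by simp)) (ih (fun x hx => h x (by simp [hx])))

lemma foldl_append_singleton {α β : Type} (f : β → α) :
    ∀ (l : List β) (acc : List α), l.foldl (fun a x => a ++ [f x]) acc = acc ++ l.map f := by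
  intro l
  induction l with
  | nil => simp
  | cons x xs ih => intro acc; simp [List.foldl_cons, ih]

lemma foldl_mul (es : List Int) : ∀ a : Int, es.foldl (fun t e => t * e) a = a * es.prod := by
  induction es with
  | nil => simp
  | cons e rest ih => intro a; simp only [List.foldl_cons, List.prod_cons, ih]; ring

-- B's inner digit loop (as a foldr over the radix list) computes decMix
lemma bfold (es : List Int) (h : ∀ e ∈ es, 0 < e) (idx : Int) :
    es.foldr (fun e (st : List Int × Int) =>
        (st.1 ++ [PySem.Int.mod st.2 e], PySem.Int.floordiv st.2 e)) ([], idx)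
    = ((decMix (idx % es.prod) es).reverse, idx / es.prod) := by
  induction es with
  | nil => simp [decMix]
  | cons e rest ih =>
    have he : 0 < e := h e (by simp)
    have hrest : ∀ x ∈ rest, 0 < x := fun x hx => h x (by simp [hx])
    have hT : 0 < rest.prod := prod_pos_of_mem hrest
    rw [List.foldr_cons, ih hrest]
    rw [PySem.Int.mod_eq_emod_of_pos he, PySem.Int.floordiv_eq_ediv_of_pos he]
    simp only [List.prod_cons, decMix, List.reverse_cons]
    have hdvd : rest.prod ∣ e * rest.prod := dvd_mul_left _ _
    have hmm : idx % (e * rest.prod) % rest.prod = idx % rest.prod :=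
      Int.emod_emod_of_dvd idx hdvd
    have hq : idx % (e * rest.prod) = idx + (-(e * (idx / (e * rest.prod)))) * rest.prod := by
      rw [Int.emod_def]; ring
    have hdivmod : idx % (e * rest.prod) / rest.prod % e = idx / rest.prod % e := by
      rw [hq, Int.add_mul_ediv_right _ _ hT.ne']
      have : idx / rest.prod + -(e * (idx / (e * rest.prod)))
           = idx / rest.prod + (-(idx / (e * rest.prod))) * e := by ring
      rw [this, Int.add_mul_emod_self_right]
    have hdd : idx / rest.prod / e = idx / (e * rest.prod) := by
      rw [Int.ediv_ediv_of_nonneg hT.le, mul_comm]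
    rw [hmm, hdivmod, hdd]

-- the product of the range lists enumerates exactly the mixed-radix decodes
lemma range_mul_flatMap (a b : Nat) :
    List.range (a * b) = (List.range a).flatMap (fun x => (List.range b).map (fun r => x * b + r)) := by
  induction a with
  | zero => simp
  | succ a ih =>
    have h1 : (a + 1) * b = a * b + b := by ring
    rw [h1, List.range_add, ih, List.range_succ, List.flatMap_append]
    simp

lemma pyProduct_ranges (es : List Int) (h : ∀ e ∈ es, 0 < e) :
    pyProduct (es.map (fun e => PySem.List.pyRange 0 e 1))
    = (List.range es.prod.toNat).map (fun k : Nat => decMix (k : Int) es) := by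
  induction es with
  | nil => simp [pyProduct, List.range_one, decMix]
  | cons e rest ih =>
    have he : 0 < e := h e (by simp)
    have hrest : ∀ x ∈ rest, 0 < x := fun x hx => h x (by simp [hx])
    have hT : 0 < rest.prod := prod_pos_of_mem hrest
    have hea : e = (e.toNat : Int) := (Int.toNat_of_nonneg he.le).symm
    have hTb : rest.prod = (rest.prod.toNat : Int) := (Int.toNat_of_nonneg hT.le).symm
    have hrange : PySem.List.pyRange 0 e 1 = (List.range e.toNat).map (fun k : Nat => (k : Int)) := by
      rw [PySem.List.pyRange_one]; simp
    simp only [List.map_cons, pyProduct, ih hrest, hrange]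
    have hn : (e * rest.prod).toNat = e.toNat * rest.prod.toNat := by
      rw [hea, hTb, ← Nat.cast_mul, Int.toNat_natCast, Int.toNat_natCast, Int.toNat_natCast]
    rw [List.prod_cons, hn, range_mul_flatMap, List.flatMap_map, List.map_flatMap]
    apply List.flatMap_congr
    intro x hx
    have hxa : x < e.toNat := List.mem_range.mp hx
    have hxe : (x : Int) < e := by rw [hea]; exact_mod_cast hxa
    rw [List.map_map, List.map_map]
    apply List.map_congr_left
    intro r hr
    have hrb : r < rest.prod.toNat := List.mem_range.mp hr
    have hrT : (r : Int) < rest.prod := by rw [hTb]; exact_mod_cast hrb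
    show (x : Int) :: decMix (r : Int) rest = decMix ((x * rest.prod.toNat + r : Nat) : Int) (e :: rest)
    have hc : ((x * rest.prod.toNat + r : Nat) : Int) = (x : Int) * rest.prod + r := by
      rw [hTb]; push_cast; simp
    have hdiv : ((x : Int) * rest.prod + r) / rest.prod = (x : Int) := by
      rw [add_comm, Int.add_mul_ediv_right _ _ hT.ne',
        Int.ediv_eq_zero_of_lt (by positivity) hrT, zero_add]
    have hmod : ((x : Int) * rest.prod + r) % rest.prod = (r : Int) := by
      rw [add_comm, Int.add_mul_emod_self_right,
        Int.emod_eq_of_lt (by positivity) hrT]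
    rw [hc, decMix, hdiv, hmod, Int.emod_eq_of_lt (by positivity) hxe]

lemma pyProduct_nil_mem {ls : List (List Int)} (h : [] ∈ ls) : pyProduct ls = [] := by
  induction ls with
  | nil => simp at h
  | cons l rest ih =>
    cases h with
    | head => simp [pyProduct]
    | tail _ h => simp [pyProduct, ih h]

-- A's dict loop with a running counter appends enumerated pairs
lemma afold (ls : List (List Int)) :
    ∀ (d : PySem.Dict Int (List Int)) (c : Int), (∀ k ∈ d.keys, k < c) →
    (ls.foldl (fun st comb => (st.1.insert st.2 comb, st.2 + 1))
      (d, c)).1.items = d.items ++ PySem.List.enumerate ls c := by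
  induction ls with
  | nil => intro d c h; simp [PySem.List.enumerate_nil]
  | cons x xs ih =>
    intro d c h
    have hc : d.contains c = false := by
      rw [Bool.eq_false_iff, Ne, PySem.Dict.contains_iff_mem_keys]
      intro hm
      exact lt_irrefl c (h c hm)
    rw [List.foldl_cons, ih (d.insert c x) (c + 1) ?_]
    · rw [PySem.Dict.items_insert_of_not_contains _ _ hc,
        PySem.List.enumerate_cons, List.append_assoc, List.singleton_append]
    · intro k hk
      rcases (PySem.Dict.mem_keys_insert _ _ _ _).mp hk with h1 | h1
      · omega
      · have := h k h1; omega

lemma enum_map_range (n : Nat) (f : Nat → List Int) :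
    PySem.List.enumerate ((List.range n).map f) 0
    = (List.range n).map (fun k : Nat => ((k : Int), f k)) := by
  induction n with
  | zero => simp [PySem.List.enumerate_nil]
  | succ n ih =>
    rw [List.range_succ, List.map_append, List.map_append, PySem.List.enumerate_append, ih]
    simp [PySem.List.enumerate_cons, PySem.List.enumerate_nil]

lemma bdictfold (v : Int → List Int) :
    ∀ (l : List Int) (d : PySem.Dict Int (List Int)),
      (∀ a ∈ l, d.contains a = false) → l.Nodup →
      (l.foldl (fun d idx => d.insert idx (v idx)) d).items
        = d.items ++ l.map (fun idx => (idx, v idx)) := by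
  intro l
  induction l with
  | nil => intro d _ _; simp
  | cons x xs ih =>
    intro d hf hn
    rw [List.foldl_cons, ih (d.insert x (v x)) ?_ (List.Nodup.of_cons hn),
      PySem.Dict.items_insert_of_not_contains _ _ (hf x (by simp))]
    · simp [List.append_assoc]
    · intro a ha
      rw [PySem.Dict.contains_insert]
      have hax : a ≠ x := by
        intro hax; subst hax; exact (List.nodup_cons.mp hn).1 ha
      simp [hax, hf a (by simp [ha])]

lemma inner_fold_id (e : Int) :
    (PySem.List.pyRange 0 e 1).foldl (fun nl pos => nl ++ [pos]) [] = PySem.List.pyRange 0 e 1 := by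
  rw [foldl_append_singleton (fun x => x)]; simp

lemma outer_fold_map (es : List Int) :
    es.foldl (fun acc entry =>
      acc ++ [(PySem.List.pyRange 0 entry 1).foldl (fun nl pos => nl ++ [pos]) []]) []
    = es.map (fun e => PySem.List.pyRange 0 e 1) := by
  rw [foldl_append_singleton
    (fun entry => (PySem.List.pyRange 0 entry 1).foldl (fun nl pos => nl ++ [pos]) [])]
  simp only [List.nil_append]
  exact List.map_congr_left (fun e _ => inner_fold_id e)

-- ===== VERDICT (by name: the statement is the Claim_ definition above) =====
theorem create_actions_conversion_dict_spec : Claim_equal_create_actions_conversion_dict := by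
  intro es _hdom
  unfold Spec_create_actions_conversion_dict
  simp only [create_actions_conversion_dict, create_actions_conversion_dict_alt, outer_fold_map]
  by_cases hb : es.any (fun e => decide (e ≤ 0)) = true
  · rw [if_pos hb]
    obtain ⟨e0, he0, hle⟩ := List.any_eq_true.mp hb
    have hle' : e0 ≤ 0 := of_decide_eq_true hle
    have hmem : ([] : List Int) ∈ es.map (fun e => PySem.List.pyRange 0 e 1) :=
      List.mem_map.mpr ⟨e0, he0, PySem.List.pyRange_one_eq_nil (by omega)⟩
    rw [pyProduct_nil_mem hmem]
    simp
  · rw [if_neg hb]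
    have hpos : ∀ e ∈ es, 0 < e := by
      intro e he
      by_contra hc
      exact hb (List.any_eq_true.mpr ⟨e, he, decide_eq_true (by omega)⟩)
    have hprodpos : 0 < es.prod := prod_pos_of_mem hpos
    have hcastn : ((es.prod.toNat : Nat) : Int) = es.prod := Int.toNat_of_nonneg hprodpos.le
    rw [pyProduct_ranges es hpos, afold _ PySem.Dict.empty 0 (by simp), enum_map_range,
      foldl_mul, one_mul,
      bdictfold (fun idx => ((es.reverse.foldl
        (fun (st : List Int × Int) e => (st.1 ++ [PySem.Int.mod st.2 e], PySem.Int.floordiv st.2 e))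
        ([], idx)).1.reverse)) _ PySem.Dict.empty (by simp) (PySem.List.nodup_pyRange_one 0 es.prod)]
    rw [← hcastn, PySem.List.pyRange_one]
    simp only [sub_zero, Int.toNat_natCast, zero_add, List.map_map]
    apply List.map_congr_left
    intro k hk
    have hkn : k < es.prod.toNat := List.mem_range.mp hk
    have hkP : (k : Int) < es.prod := by rw [← hcastn]; exact_mod_cast hkn
    simp only [Function.comp_def]
    rw [List.foldl_reverse, bfold es hpos (k : Int), List.reverse_reverse,
      Int.emod_eq_of_lt (by positivity) hkP]
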